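-- pv_equiv track=rewrite | github.com/JayMarzan36/Sentiment-Analysis | Sentiment-Analysis/src/main.py | countemotions
-- ===== SOURCE A (Python) =====
-- def countemotions(found_emotions):
--     word_count = {}
--     for emotion in found_emotions:
--         if emotion in word_count:
--             word_count[emotion] += 1
--         else:
--             word_count[emotion] = 1
--     word_count = dict(sorted(word_count.items(), key=lambda item: item[1], reverse=True))
--     return word_count
-- ===== SOURCE B (Python) =====
-- def countemotions(found_emotions):
--     counts = {}
--     for e in found_emotions:
--         counts[e] = counts.get(e, 0) + 1
--     if not counts:
--         return {}
--     buckets = {}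
--     for e, c in counts.items():
--         buckets.setdefault(c, []).append(e)
--     pairs = []
--     for c in range(max(counts.values()), 0, -1):
--         for e in buckets.get(c, []):
--             pairs.append((e, c))
--     return dict(pairs)
-- ===== Notes on version B (the rewrite author's own statement) =====
-- stated objective: alternative
-- what changed: Replaces the comparison sort of (emotion,count) items by a bucket (counting) sort: counts are grouped into buckets keyed by frequency and emitted by scanning frequencies from max(counts.values()) down to 1, reproducing the stable descending order by first appearance.
import Mathlib
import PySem

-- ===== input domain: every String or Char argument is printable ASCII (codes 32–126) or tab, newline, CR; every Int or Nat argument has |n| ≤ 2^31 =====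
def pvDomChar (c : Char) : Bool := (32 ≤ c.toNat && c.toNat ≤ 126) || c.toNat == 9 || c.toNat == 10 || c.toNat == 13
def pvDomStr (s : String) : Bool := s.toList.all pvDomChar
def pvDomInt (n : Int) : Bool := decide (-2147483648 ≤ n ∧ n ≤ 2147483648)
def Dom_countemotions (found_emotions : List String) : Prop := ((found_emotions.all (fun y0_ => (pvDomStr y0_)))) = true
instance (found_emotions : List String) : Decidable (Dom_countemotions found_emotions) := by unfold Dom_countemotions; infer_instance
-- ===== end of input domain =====

-- B replaces A's comparison sort by count with a bucket (counting) sort over the frequencies; same return value.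

-- ===== PORT A =====
-- the counting loop: if emotion in word_count: +=1 else: =1; then dict(sorted(items, key=count, reverse=True))
def countemotions (found_emotions : List String) : List (String × Int) :=
  let word_count :=
    found_emotions.foldl
      (fun d e => if d.contains e then d.insert e (d.getD e 0 + 1) else d.insert e 1)
      (PySem.Dict.empty : PySem.Dict String Int)
  (PySem.Dict.ofList (PySem.List.sorted word_count.items (fun item => item.2) true)).items

-- ===== PORT B =====
-- count with get; group emotions into buckets keyed by their count; emit buckets from max count down to 1
def countemotions_alt (found_emotions : List String) : List (String × Int) :=
  let counts :=
    found_emotions.foldl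
      (fun d e => d.insert e (d.getD e 0 + 1))
      (PySem.Dict.empty : PySem.Dict String Int)
  if counts.items = [] then []          -- 'if not counts: return {}'
  else
    let buckets :=
      counts.items.foldl
        (fun d p => d.modify p.2 [] (fun l => l ++ [p.1]))   -- buckets.setdefault(c, []).append(e)
        (PySem.Dict.empty : PySem.Dict Int (List String))
    let pairs :=
      (PySem.List.pyRange ((PySem.List.max? counts.values (fun v => v)).getD 0) 0 (-1)).foldl
        (fun acc c => acc ++ (buckets.getD c []).map (fun e => (e, c))) []
        -- .getD 0 is only a totality guard: counts is nonempty here, so max? is some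
  (PySem.Dict.ofList pairs).items

-- ===== PRECONDITION & SPEC =====
def Spec_countemotions (found_emotions : List String) (out : List (String × Int)) : Prop := out = countemotions_alt found_emotions
instance (found_emotions : List String) (out : List (String × Int)) : Decidable (Spec_countemotions found_emotions out) := by unfold Spec_countemotions; infer_instance

-- ===== CLAIM (what is proved, stated in full; the proofs are below) =====
def Claim_equal_countemotions : Prop := ∀ (found_emotions : List String), Dom_countemotions found_emotions → Spec_countemotions found_emotions (countemotions found_emotions)

-- ===== LEMMAS AND PROOFS =====

-- A's counting loop is Counter(xs): both branches insert getD+1 (getD = 0 when absent)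
lemma aLoop_eq_counter (xs : List String) :
    xs.foldl (fun d e => if d.contains e then d.insert e (d.getD e 0 + 1) else d.insert e 1)
      (PySem.Dict.empty : PySem.Dict String Int) = PySem.Dict.counter xs := by
  rw [← PySem.Dict.foldl_insert_getD_add_one_eq_counter]
  congr 1
  funext d e
  by_cases h : d.contains e = true
  · simp [h]
  · rw [PySem.Dict.getD_of_not_contains d 0 (by simpa using h)]
    simp [h]

lemma flatMap_congr_mem {α β : Type} (l : List α) (f g : α → List β)
    (h : ∀ a ∈ l, f a = g a) : l.flatMap f = l.flatMap g := by
  induction l with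
  | nil => rfl
  | cons a t ih =>
    simp only [List.flatMap_cons, h a (by simp), ih (fun a ha => h a (by simp [ha]))]

lemma insertBy_nil {α : Type} (before : α → α → Bool) (x : α) :
    PySem.List.insertBy before x [] = [x] := rfl

lemma insertBy_cons_pos {α : Type} (before : α → α → Bool) (x y : α) (ys : List α)
    (h : before x y = true) :
    PySem.List.insertBy before x (y :: ys) = x :: y :: ys := by
  simp [PySem.List.insertBy, h]

lemma insertBy_cons_neg {α : Type} (before : α → α → Bool) (x y : α) (ys : List α)
    (h : before x y = false) :
    PySem.List.insertBy before x (y :: ys) = y :: PySem.List.insertBy before x ys := by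
  simp [PySem.List.insertBy, h]

lemma insertBy_append_of_not {α : Type} (before : α → α → Bool) (x : α) (A B : List α)
    (h : ∀ a ∈ A, before x a = false) :
    PySem.List.insertBy before x (A ++ B) = A ++ PySem.List.insertBy before x B := by
  induction A with
  | nil => rfl
  | cons a t ih =>
    rw [List.cons_append, insertBy_cons_neg before x a (t ++ B) (h a (by simp)),
        ih (fun a ha => h a (by simp [ha])), List.cons_append]

-- stable descending sort by an Int key bounded in [1, m] IS the bucket emission m, m-1, …, 1
lemma sorted_rev_eq_flatMap_buckets {α : Type} (m : Int) (l : List (α × Int))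
    (hb : ∀ p ∈ l, 1 ≤ p.2 ∧ p.2 ≤ m) :
    PySem.List.sorted l (fun p => p.2) true
      = (PySem.List.pyRange m 0 (-1)).flatMap (fun c => l.filter (fun p => p.2 == c)) := by
  induction l using List.reverseRecOn with
  | nil =>
    rw [PySem.List.sorted_rev_eq_foldl_insertBy]
    simp
  | append_singleton l x ih =>
    have hx := hb x (by simp)
    have hl : ∀ p ∈ l, 1 ≤ p.2 ∧ p.2 ≤ m := fun p hp => hb p (by simp [hp])
    rw [PySem.List.sorted_rev_eq_foldl_insertBy, List.foldl_append,
        ← PySem.List.sorted_rev_eq_foldl_insertBy, ih hl]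
    -- split the countdown range at k := x.2 : [m..1] = [m..k+1] ++ [k] ++ [k-1..1]
    have hsplit : PySem.List.pyRange m 0 (-1)
        = PySem.List.pyRange m x.2 (-1) ++ [x.2] ++ PySem.List.pyRange (x.2 - 1) 0 (-1) := by
      rw [PySem.List.pyRange_neg_one_eq_reverse m 0,
          show (0:Int) + 1 = 1 from rfl,
          PySem.List.pyRange_one_append 1 x.2 (m + 1) hx.1 (by omega),
          PySem.List.pyRange_one_cons (show x.2 < m + 1 by omega),
          List.reverse_append, List.reverse_cons,
          PySem.List.pyRange_neg_one_eq_reverse m x.2,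
          PySem.List.pyRange_neg_one_eq_reverse (x.2 - 1) 0,
          show x.2 - 1 + 1 = x.2 by omega, show (0:Int) + 1 = 1 from rfl]
    rw [hsplit]
    simp only [List.flatMap_append, List.flatMap_cons, List.flatMap_nil, List.append_nil]
    have hHi : ∀ c ∈ PySem.List.pyRange m x.2 (-1),
        (l ++ [x]).filter (fun p => p.2 == c) = l.filter (fun p => p.2 == c) := by
      intro c hc
      have : x.2 < c := (PySem.List.mem_pyRange_neg_one.mp hc).1
      simp [List.filter_append, show ¬ (x.2 = c) by omega]
    have hLo : ∀ c ∈ PySem.List.pyRange (x.2 - 1) 0 (-1),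
        (l ++ [x]).filter (fun p => p.2 == c) = l.filter (fun p => p.2 == c) := by
      intro c hc
      have : c < x.2 := by have := (PySem.List.mem_pyRange_neg_one.mp hc).2; omega
      simp [List.filter_append, show ¬ (x.2 = c) by omega]
    rw [flatMap_congr_mem _ _ _ hHi, flatMap_congr_mem _ _ _ hLo]
    have hAt : (l ++ [x]).filter (fun p => p.2 == x.2) = l.filter (fun p => p.2 == x.2) ++ [x] := by
      simp [List.filter_append]
    rw [hAt]
    -- now insert x: it passes everything with key ≥ x.2 and stops at the first key < x.2
    set FH := (PySem.List.pyRange m x.2 (-1)).flatMap (fun c => l.filter (fun p => p.2 == c)) with hFH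
    set fk := l.filter (fun p => p.2 == x.2) with hfk
    set FL := (PySem.List.pyRange (x.2 - 1) 0 (-1)).flatMap (fun c => l.filter (fun p => p.2 == c)) with hFL
    have hnotA : ∀ a ∈ FH ++ fk, (fun a b : α × Int => decide (b.2 < a.2)) x a = false := by
      intro a ha
      rcases List.mem_append.mp ha with hA | hk
      · rw [hFH] at hA
        rcases List.mem_flatMap.mp hA with ⟨c, hc, hma⟩
        have h1 : x.2 < c := (PySem.List.mem_pyRange_neg_one.mp hc).1
        have h2 : a.2 = c := by simpa using (List.mem_filter.mp hma).2
        simp [h2]; omega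
      · rw [hfk] at hk
        have h2 : a.2 = x.2 := by simpa using (List.mem_filter.mp hk).2
        simp [h2]
    have hB : ∀ b ∈ FL, (fun a b : α × Int => decide (b.2 < a.2)) x b = true := by
      intro b hbm
      rcases List.mem_flatMap.mp (hFL ▸ hbm) with ⟨c, hc, hmb⟩
      have h1 : c ≤ x.2 - 1 := (PySem.List.mem_pyRange_neg_one.mp hc).2
      have h2 : b.2 = c := by simpa using (List.mem_filter.mp hmb).2
      simp [h2]; omega
    calc PySem.List.insertBy (fun a b => decide (b.2 < a.2)) x ((FH ++ fk) ++ FL)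
        = (FH ++ fk) ++ PySem.List.insertBy (fun a b => decide (b.2 < a.2)) x FL := by
          rw [insertBy_append_of_not _ _ _ _ hnotA]
      _ = FH ++ (fk ++ [x]) ++ FL := by
          cases hFLc : FL with
          | nil => simp [insertBy_nil]
          | cons b B =>
            rw [insertBy_cons_pos _ _ _ _ (hB b (by rw [hFLc]; simp))]
            simp
  -- (the calc's left side is the goal's LHS after associativity)

-- B's bucket dict: buckets.get(c, []) = the emotions of cs whose count is c, in order
lemma buckets_getD (cs : List (String × Int)) (c : Int) :
    ((cs.foldl (fun d p => d.modify p.2 [] (fun l => l ++ [p.1]))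
        (PySem.Dict.empty : PySem.Dict Int (List String))).getD c [])
      = (cs.filter (fun p => p.2 == c)).map (fun p => p.1) := by
  have hswap : (cs.foldl (fun d p => d.modify p.2 [] (fun l => l ++ [p.1]))
        (PySem.Dict.empty : PySem.Dict Int (List String)))
      = ((cs.map Prod.swap).foldl
          (fun d q => d.modify q.1 [] (fun l => l ++ [q.2])) PySem.Dict.empty) := by
    rw [List.foldl_map]
    simp [Prod.swap]
  rw [hswap, PySem.Dict.getD_foldl_modify_append]
  simp [List.filter_map, Function.comp_def, List.map_map]

-- ===== VERDICT (by name: the statement is the Claim_ definition above) =====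
theorem countemotions_spec : Claim_equal_countemotions := by
  intro xs _
  show countemotions xs = countemotions_alt xs
  cases xs with
  | nil => decide
  | cons e rest =>
    simp only [countemotions, countemotions_alt, aLoop_eq_counter,
      PySem.Dict.foldl_insert_getD_add_one_eq_counter]
    set xs := e :: rest with hxs
    have hitems := PySem.Dict.items_counter xs
    have hne : (PySem.Dict.counter xs).items ≠ [] := by
      rw [hitems, hxs, PySem.Set.ofList_cons]
      simp
    rw [if_neg hne]
    -- the max of the values
    have hvals : (PySem.Dict.counter xs).values = (PySem.Dict.counter xs).items.map (fun p => p.2) := rfl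
    have hvne : (PySem.Dict.counter xs).values ≠ [] := by
      rw [hvals]; simpa using hne
    obtain ⟨m, hm⟩ : ∃ m, PySem.List.max? (PySem.Dict.counter xs).values (fun v => v) = some m := by
      cases h : PySem.List.max? (PySem.Dict.counter xs).values (fun v => v) with
      | none => exact absurd ((PySem.List.max?_eq_none_iff _ _).mp h) hvne
      | some m => exact ⟨m, rfl⟩
    rw [hm]
    have hbound : ∀ p ∈ (PySem.Dict.counter xs).items, 1 ≤ p.2 ∧ p.2 ≤ m := by
      intro p hp
      constructor
      · rw [hitems] at hp
        rcases List.mem_map.mp hp with ⟨k, hk, hpk⟩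
        have hkx : k ∈ xs := (PySem.Set.mem_ofList _ _).mp hk
        have : 0 < xs.count k := List.count_pos_iff.mpr hkx
        rw [← hpk]; simpa using this
      · have : p.2 ∈ (PySem.Dict.counter xs).values := by
          rw [hvals]; exact List.mem_map.mpr ⟨p, hp, rfl⟩
        exact PySem.List.max?_isMax hm p.2 this
    simp only [Option.getD_some]
    rw [PySem.List.foldl_append_eq_flatMap, List.nil_append]
    congr 2
    rw [sorted_rev_eq_flatMap_buckets m _ hbound]
    refine flatMap_congr_mem _ _ _ (fun c _ => ?_)
    rw [buckets_getD, List.map_map]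
    refine Eq.symm (Eq.trans (List.map_congr_left ?_) (List.map_id _))
    intro p hp
    have : p.2 = c := by simpa using (List.mem_filter.mp hp).2
    simp [Function.comp, ← this]
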